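-- pv_equiv track=rewrite | github.com/babyyu0/Programmers-BOJHub | Python3/프로그래머스/1/135808. 과일 장수/과일 장수.py | solution
-- ===== SOURCE A (Python) =====
-- def solution(k, m, score):
--     score.sort(reverse=True)
--     answer = 0
--
--     for i in range(0, len(score), m):
--         if len(score) < i + m:
--             break
--         answer += score[i + m - 1] * m
--
--     return answer
-- ===== SOURCE B (Python) =====
-- def solution(k, m, score):
--     # Bucket-count the scores, then walk the distinct values from high to low:
--     # after `taken` fruits, taken // m boxes are complete; every box completed
--     # while consuming value v has v as its minimum (its price).  No indexing
--     # into a fully sorted array: only distinct values are ordered.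
--     cnt = {}
--     for s in score:
--         cnt[s] = cnt.get(s, 0) + 1
--     total = 0
--     taken = 0
--     boxes = 0
--     for v in sorted(cnt, reverse=True):
--         taken += cnt[v]
--         nb = taken // m
--         total += v * (nb - boxes)
--         boxes = nb
--     return m * total
-- ===== Notes on version B (the rewrite author's own statement) =====
-- stated objective: alternative
-- what changed: A fully sorts the list descending and reads each box's minimum by strided indexing; B never orders the elements: it bucket-counts scores into a dict, sorts only the distinct values, and counts completed boxes per value with floor division (taken//m), summing v times the number of boxes whose minimum is v.
-- outside the precondition, e.g. on solution(1, -1, [5]): A returns 0, B returns 5; on solution(1, 0, [5]): A raises ValueError, B raises ZeroDivisionError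
import Mathlib
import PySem

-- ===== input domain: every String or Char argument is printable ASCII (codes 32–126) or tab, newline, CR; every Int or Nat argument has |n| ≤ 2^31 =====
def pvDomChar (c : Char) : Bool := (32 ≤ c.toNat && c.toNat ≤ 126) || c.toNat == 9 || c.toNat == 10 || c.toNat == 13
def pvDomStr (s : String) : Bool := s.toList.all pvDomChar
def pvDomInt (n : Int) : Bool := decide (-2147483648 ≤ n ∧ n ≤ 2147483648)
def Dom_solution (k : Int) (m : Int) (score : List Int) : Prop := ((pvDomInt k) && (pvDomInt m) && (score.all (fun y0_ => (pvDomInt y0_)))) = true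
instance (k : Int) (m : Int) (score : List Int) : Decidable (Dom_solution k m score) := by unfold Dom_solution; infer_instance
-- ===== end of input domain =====

-- B bucket-counts the scores into a dict and walks only the distinct values from high to
-- low, counting completed boxes by floor division — no ordering of the elements themselves.
-- (Note: the Python A sorts `score` in place, B does not — the claim is about the return value.)

-- ===== PORT A =====
-- the for-loop over range(0, len(score), m) with its `break`
def loopA (s : List Int) (m : Int) : List Int → Int → Int
  | [], ans => ans
  | i :: rest, ans =>
    if (s.length : Int) < i + m then ans
    else loopA s m rest (ans + PySem.List.pyGetD s (i + m - 1) 0 * m)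

def solution (k : Int) (m : Int) (score : List Int) : Int :=
  let s := PySem.List.sorted score (fun x => x) true
  loopA s m (PySem.List.pyRange 0 (s.length : Int) m) 0

-- ===== PORT B =====
-- the for-loop over sorted(cnt, reverse=True) with state (total, taken, boxes);
-- cnt[v] is read with getD: v is always a key of cnt, so this equals Python's cnt[v]
def loopB (cnt : PySem.Dict Int Int) (m : Int) : List Int → Int × Int × Int → Int
  | [], st => st.1
  | v :: rest, (total, taken, boxes) =>
    let taken' := taken + cnt.getD v 0
    let nb := PySem.Int.floordiv taken' m
    loopB cnt m rest (total + v * (nb - boxes), taken', nb)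

def solution_alt (k : Int) (m : Int) (score : List Int) : Int :=
  let cnt := score.foldl (fun d s => d.insert s (d.getD s 0 + 1)) PySem.Dict.empty
  m * loopB cnt m (PySem.List.sorted cnt.keys (fun x => x) true) (0, 0, 0)

-- ===== PRECONDITION & SPEC =====
-- Pre_ restricts to the natural domain of a box size m ≥ 1: at m = 0 A raises ValueError
-- (and B ZeroDivisionError), and for m < 0 A degenerately returns 0 (empty range) while
-- B's floor-division box counting is meaningless there.
def Pre_solution (k : Int) (m : Int) (score : List Int) : Prop := 1 ≤ m
instance (k : Int) (m : Int) (score : List Int) : Decidable (Pre_solution k m score) := by unfold Pre_solution; infer_instance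

def pvWitness_solution : Int × Int × List Int := (4, 2, [1, 2, 3, 1])

def Spec_solution (k : Int) (m : Int) (score : List Int) (out : Int) : Prop := out = solution_alt k m score
instance (k : Int) (m : Int) (score : List Int) (out : Int) : Decidable (Spec_solution k m score out) := by unfold Spec_solution; infer_instance

-- ===== CLAIM (what is proved, stated in full; the proofs are below) =====
def Claim_equal_solution : Prop := ∀ (k : Int) (m : Int) (score : List Int), Dom_solution k m score → Pre_solution k m score → Spec_solution k m score (solution k m score)

-- ===== LEMMAS AND PROOFS =====

-- proof-side: run lengths as (value, count) pairs; `blocks` expands them, `G` is B's sum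
def blocks : List (Int × Nat) → List Int
  | [] => []
  | (v, c) :: ps => List.replicate c v ++ blocks ps

def G (M : Nat) : List (Int × Nat) → Nat → Int
  | [], _ => 0
  | (v, c) :: ps, P => v * ((((P + c) / M : Nat) : Int) - ((P / M : Nat) : Int)) + G M ps (P + c)

theorem mem_blocks {x : Int} {vs : List Int} {f : Int → Nat}
    (h : x ∈ blocks (vs.map fun v => (v, f v))) : x ∈ vs := by
  induction vs with
  | nil => simp [blocks] at h
  | cons v t ih =>
    simp only [List.map_cons, blocks, List.mem_append, List.mem_replicate] at h
    rcases h with ⟨_, rfl⟩ | h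
    · exact List.mem_cons_self
    · exact List.mem_cons_of_mem _ (ih h)

theorem count_blocks (vs : List Int) (f : Int → Nat) (x : Int) (h : vs.Nodup) :
    (blocks (vs.map fun v => (v, f v))).count x = if x ∈ vs then f x else 0 := by
  induction vs with
  | nil => simp [blocks]
  | cons v t ih =>
    rcases List.nodup_cons.mp h with ⟨hv, ht⟩
    simp only [List.map_cons, blocks, List.count_append, List.count_replicate, ih ht,
      List.mem_cons]
    by_cases hx : x = v
    · subst hx; simp [hv]
    · simp [hx, Ne.symm hx]

theorem pairwise_blocks (vs : List Int) (f : Int → Nat) (h : vs.Pairwise (fun a b => b < a)) :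
    (blocks (vs.map fun v => (v, f v))).Pairwise (fun a b => b ≤ a) := by
  induction vs with
  | nil => exact List.Pairwise.nil
  | cons v t ih =>
    rcases List.pairwise_cons.mp h with ⟨hv, ht⟩
    simp only [List.map_cons, blocks]
    refine List.pairwise_append.mpr ⟨?_, ih ht, ?_⟩
    · exact List.pairwise_replicate.mpr (Or.inr le_rfl)
    · intro a ha b hb
      rcases List.mem_replicate.mp ha with ⟨_, rfl⟩
      exact le_of_lt (hv _ (mem_blocks hb))

theorem length_blocks_cons (v : Int) (c : Nat) (ps : List (Int × Nat)) :
    (blocks ((v, c) :: ps)).length = c + (blocks ps).length := by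
  simp [blocks]

-- the central sum identity: summing the box-minimum positions in the expanded list
-- equals B's per-distinct-value floor-division count
theorem sumG (M : Nat) (hM : 0 < M) :
    ∀ (ps : List (Int × Nat)) (P : Nat),
      ∑ j ∈ Finset.Ico (P / M + 1) ((P + (blocks ps).length) / M + 1),
        (blocks ps).getD (j * M - 1 - P) 0 = G M ps P := by
  intro ps
  induction ps with
  | nil => intro P; simp [blocks, G]
  | cons p t ih =>
    obtain ⟨v, c⟩ := p
    intro P
    have hd1 : P / M ≤ (P + c) / M := Nat.div_le_div_right (by omega)
    have hd2 : (P + c) / M ≤ (P + (c + (blocks t).length)) / M := Nat.div_le_div_right (by omega)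
    have hblk : blocks ((v, c) :: t) = List.replicate c v ++ blocks t := rfl
    rw [length_blocks_cons,
      ← Finset.sum_Ico_consecutive _ (by omega : P / M + 1 ≤ (P + c) / M + 1)
        (by omega : (P + c) / M + 1 ≤ (P + (c + (blocks t).length)) / M + 1)]
    have hfirst : ∑ j ∈ Finset.Ico (P / M + 1) ((P + c) / M + 1),
        (blocks ((v, c) :: t)).getD (j * M - 1 - P) 0
        = v * ((((P + c) / M : Nat) : Int) - ((P / M : Nat) : Int)) := by
      have hval : ∀ j ∈ Finset.Ico (P / M + 1) ((P + c) / M + 1),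
          (blocks ((v, c) :: t)).getD (j * M - 1 - P) 0 = v := by
        intro j hj
        rcases Finset.mem_Ico.mp hj with ⟨hj1, hj2⟩
        have hPj : P < j * M := (Nat.div_lt_iff_lt_mul hM).mp (by omega)
        have hjc : j * M ≤ P + c := (Nat.le_div_iff_mul_le hM).mp (by omega)
        have hidx : j * M - 1 - P < c := by omega
        rw [hblk, List.getD_append _ _ _ _ (by simpa using hidx),
          List.getD_eq_getElem _ _ (by simpa using hidx), List.getElem_replicate]
      rw [Finset.sum_congr rfl hval, Finset.sum_const, Nat.card_Ico, nsmul_eq_mul]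
      have hcard : ((P + c) / M + 1 - (P / M + 1) : Nat) = (P + c) / M - P / M := by omega
      rw [hcard, Nat.cast_sub hd1]; ring
    have hsecond : ∑ j ∈ Finset.Ico ((P + c) / M + 1) ((P + (c + (blocks t).length)) / M + 1),
        (blocks ((v, c) :: t)).getD (j * M - 1 - P) 0 = G M t (P + c) := by
      have harg : P + (c + (blocks t).length) = (P + c) + (blocks t).length := by omega
      rw [harg, ← ih (P + c)]
      refine Finset.sum_congr rfl (fun j hj => ?_)
      rcases Finset.mem_Ico.mp hj with ⟨hj1, hj2⟩
      have hPj : P + c < j * M := (Nat.div_lt_iff_lt_mul hM).mp (by omega)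
      rw [hblk, List.getD_append_right _ _ _ _ (by simp; omega)]
      simp only [List.length_replicate]
      congr 1
      omega
    rw [hfirst, hsecond]
    simp [G]

theorem loopB_eq_G (cnt : PySem.Dict Int Int) (M : Nat) (f : Int → Nat) :
    ∀ (vs : List Int) (total : Int) (P : Nat),
      (∀ v ∈ vs, cnt.getD v 0 = ((f v : Nat) : Int)) →
      loopB cnt (M : Int) vs (total, (P : Int), ((P / M : Nat) : Int))
        = total + G M (vs.map fun v => (v, f v)) P := by
  intro vs
  induction vs with
  | nil => intro total P h; simp [loopB, G]
  | cons v t ih =>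
    intro total P h
    have hv := h v List.mem_cons_self
    have h1 : (P : Int) + ((f v : Nat) : Int) = ((P + f v : Nat) : Int) := by push_cast; ring
    simp only [loopB, hv, h1, PySem.Int.floordiv_natCast]
    rw [ih _ (P + f v) (fun w hw => h w (List.mem_cons_of_mem _ hw))]
    simp only [List.map_cons, G]
    ring

theorem loopA_pass (s : List Int) (m : Int) (l₁ l₂ : List Int) (ans : Int)
    (h : ∀ i ∈ l₁, ¬ ((s.length : Int) < i + m)) :
    loopA s m (l₁ ++ l₂) ans
      = loopA s m l₂ (ans + (l₁.map (fun i => PySem.List.pyGetD s (i + m - 1) 0 * m)).sum) := by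
  induction l₁ generalizing ans with
  | nil => simp
  | cons i t ih =>
    have hi : ¬ ((s.length : Int) < i + m) := h i (by simp)
    simp only [List.cons_append, loopA, if_neg hi]
    rw [ih _ (fun j hj => h j (by simp [hj]))]
    simp [add_assoc]

-- A's value as a clean finite sum over the descending sort
theorem solution_char (k : Int) (M : Nat) (hM : 0 < M) (score : List Int) :
    solution k (M : Int) score
      = (M : Int) * ∑ j ∈ Finset.Ico 1 (score.length / M + 1),
          (PySem.List.sorted score (fun x => x) true).getD (j * M - 1) 0 := by
  simp only [solution]
  set a := PySem.List.sorted score (fun x => x) true with ha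
  have hlen : a.length = score.length := PySem.List.length_sorted score (fun x => x) true
  rw [← hlen]
  set N := a.length with hN
  obtain ⟨q, r, hrM, hNsplit⟩ : ∃ q r, r < M ∧ M * q + r = N :=
    ⟨N / M, N % M, Nat.mod_lt _ hM, Nat.div_add_mod N M⟩
  have hq : N / M = q := by
    rw [← hNsplit, Nat.mul_add_div hM, Nat.div_eq_of_lt hrM, Nat.add_zero]
  have hMq : M * q ≤ N := by omega
  rw [hq]
  -- A's range: q full-box start indices, plus (iff M ∤ N) one that hits the break
  have hcA : PySem.List.pyRange 0 (N : Int) (M : Int)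
      = (List.range q).map (fun kk : Nat => (M : Int) * kk)
        ++ (if r = 0 then ([] : List Int) else [(M : Int) * q]) := by
    rw [PySem.List.pyRange_of_pos _ _ (by exact_mod_cast hM : (0:Int) < (M:Int))]
    by_cases hr0 : r = 0
    · rw [if_pos hr0, List.append_nil]
      by_cases hNpos : (0 : Int) < (N : Int)
      · rw [if_pos hNpos]
        have hnum : (N : Int) - 0 + M - 1 = ((M : Int) - 1) + M * q := by
          push_cast [← hNsplit, hr0]; ring
        rw [hnum, Int.add_mul_ediv_left _ _ (by exact_mod_cast hM.ne' : (M : Int) ≠ 0),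
          Int.ediv_eq_zero_of_lt (by omega) (by omega)]
        have hT : ((0 : Int) + q).toNat = q := by omega
        rw [hT]
        exact List.map_congr_left (fun kk _ => by ring)
      · rw [if_neg hNpos]
        have h5 : N = 0 := by omega
        have h6 : M * q = 0 := by omega
        have h7 : q = 0 := (Nat.mul_eq_zero.mp h6).resolve_left hM.ne'
        simp [h7]
    · rw [if_neg hr0, if_pos (by exact_mod_cast Nat.pos_of_ne_zero (by omega : N ≠ 0))]
      have hnum : (N : Int) - 0 + M - 1 = ((r : Int) - 1) + M * (q + 1) := by
        push_cast [← hNsplit]; ring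
      rw [hnum, Int.add_mul_ediv_left _ _ (by exact_mod_cast hM.ne' : (M : Int) ≠ 0),
        Int.ediv_eq_zero_of_lt (by omega) (by omega)]
      have hT : ((0 : Int) + (q + 1)).toNat = q + 1 := by omega
      rw [hT, List.range_succ, List.map_append]
      refine congrArg₂ _ (List.map_congr_left (fun kk _ => by ring)) ?_
      simp
  rw [hcA, loopA_pass]
  · -- the leftover index (if any) hits the break immediately
    have htail : loopA a (M : Int) (if r = 0 then ([] : List Int) else [(M : Int) * q])
        = fun ans => ans := by
      by_cases hr0 : r = 0
      · rw [if_pos hr0]; funext ans; rfl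
      · rw [if_neg hr0]; funext ans
        simp only [loopA]
        rw [if_pos (by exact_mod_cast (by omega : N < M * q + M))]
    rw [htail, zero_add, List.map_map]
    have hbridge : ∀ (f : Nat → Int), ((List.range q).map f).sum = ∑ i ∈ Finset.range q, f i :=
      fun f => rfl
    rw [hbridge]
    have hterm : ∀ kk ∈ Finset.range q,
        ((fun i => PySem.List.pyGetD a (i + (M : Int) - 1) 0 * (M : Int)) ∘
          (fun kk : Nat => (M : Int) * kk)) kk
        = a.getD (M * kk + M - 1) 0 * (M : Int) := by
      intro kk hk
      have h1 : 1 ≤ M * kk + M := le_trans hM (Nat.le_add_left M (M * kk))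
      have hidx : (M : Int) * kk + M - 1 = ((M * kk + M - 1 : Nat) : Int) := by
        rw [Nat.cast_sub h1]; push_cast; ring
      simp only [Function.comp]
      rw [hidx, PySem.List.pyGetD_natCast]
    rw [Finset.sum_congr rfl hterm, ← Finset.sum_mul, mul_comm, Finset.sum_Ico_eq_sum_range]
    have h2 : q + 1 - 1 = q := by omega
    rw [h2]
    refine congrArg _ (Finset.sum_congr rfl (fun i _ => ?_))
    have h3 : (1 + i) * M = M * i + M := by ring
    rw [h3]
  · -- every full-box start index passes the guard
    intro i hi
    obtain ⟨kk, hk, rfl⟩ := List.mem_map.mp hi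
    have hkq : kk < q := List.mem_range.mp hk
    have h1 : M * kk + M ≤ N := by
      have hmul1 : M * (kk + 1) ≤ M * q := Nat.mul_le_mul_left _ (by omega)
      have hmul2 : M * (kk + 1) = M * kk + M := by ring
      omega
    exact not_lt.mpr (by exact_mod_cast h1)

theorem solution_eq_alt (k m : Int) (score : List Int) (hm : 1 ≤ m) :
    solution k m score = solution_alt k m score := by
  obtain ⟨M, rfl⟩ : ∃ M : Nat, m = (M : Int) := ⟨m.toNat, (Int.toNat_of_nonneg (by omega)).symm⟩
  have hM : 0 < M := by exact_mod_cast hm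
  rw [solution_char k M hM score]
  simp only [solution_alt]
  rw [PySem.Dict.foldl_insert_getD_add_one_eq_counter, PySem.Dict.keys_counter]
  set vs := PySem.List.sorted (PySem.Set.ofList score) (fun x => x) true with hvs
  set ps := vs.map (fun v => (v, score.count v)) with hps
  -- B's loop computes G
  have hcnt : ∀ v ∈ vs, (PySem.Dict.counter score).getD v 0 = ((score.count v : Nat) : Int) :=
    fun v _ => PySem.Dict.getD_counter score v
  have hB : loopB (PySem.Dict.counter score) (M : Int) vs (0, 0, 0) = G M ps 0 := by
    have h0 := loopB_eq_G (PySem.Dict.counter score) M (fun v => score.count v) vs 0 0 hcnt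
    simpa using h0
  rw [hB]
  congr 1
  -- the expanded run-length blocks are exactly the descending sort
  have hvs_nodup : vs.Nodup :=
    ((PySem.List.sorted_perm (PySem.Set.ofList score) (fun x => x) true).nodup_iff).mpr
      (PySem.Set.nodup_ofList score)
  have hvs_gt : vs.Pairwise (fun a b => b < a) :=
    ((PySem.List.sorted_pairwise_rev (PySem.Set.ofList score) (fun x => x)).and hvs_nodup).imp
      (fun h => lt_of_le_of_ne h.1 (Ne.symm h.2))
  have hmem : ∀ x : Int, x ∈ vs ↔ x ∈ score := by
    intro x
    rw [hvs, PySem.List.mem_sorted, PySem.Set.mem_ofList]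
  have hperm : (blocks ps).Perm score := by
    refine List.perm_iff_count.mpr (fun x => ?_)
    rw [hps, count_blocks vs _ x hvs_nodup]
    by_cases hx : x ∈ score
    · rw [if_pos ((hmem x).mpr hx)]
    · rw [if_neg (fun h => hx ((hmem x).mp h)), List.count_eq_zero_of_not_mem hx]
  have hblocks : blocks ps = PySem.List.sorted score (fun x => x) true := by
    apply PySem.List.eq_of_perm_of_pairwise_le_of_injective (key := fun x => -x) neg_injective
    · exact hperm.trans (PySem.List.sorted_perm score (fun x => x) true).symm
    · exact (pairwise_blocks vs _ hvs_gt).imp (fun h => neg_le_neg h)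
    · exact (PySem.List.sorted_pairwise_rev score (fun x => x)).imp (fun h => neg_le_neg h)
  have hlen : (blocks ps).length = score.length := hperm.length_eq
  have hsum := sumG M hM ps 0
  simp only [Nat.zero_div, Nat.zero_add, Nat.sub_zero, hlen] at hsum
  rw [← hsum, hblocks]

-- ===== VERDICT (by name: the statement is the Claim_ definition above) =====
theorem solution_spec : Claim_equal_solution := by
  intro k m score _ hpre
  unfold Spec_solution
  exact solution_eq_alt k m score hpre
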